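-- pv_equiv track=rewrite | github.com/pypi-data/pypi-code-111 | coiled/coiled-0.0.65.post0.dev93-py3-none-any.whl/utils.py | scheduler_ports
-- ===== SOURCE A (Python) =====
-- from typing import Dict, List, NoReturn, Optional, Tuple, Union
--
-- def scheduler_ports(protocol: Union[str, List[str]]):
--     """Generate scheduler ports based on protocol(s)"""
--     exclude = 8787  # dashboard port
--     start = 8786
--     if isinstance(protocol, str):
--         return start
--
--     port = start
--     ports = []
--     for _ in protocol:
--         if port == exclude:
--             port += 1
--         ports.append(port)
--         port += 1
--     return ports
-- ===== SOURCE B (Python) =====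
-- def scheduler_ports(protocol):
--     """Generate scheduler ports based on protocol(s)"""
--     start = 8786
--     if isinstance(protocol, str):
--         return start
--     # index formula: position 0 gets 8786, position i>=1 gets 8787+i (dashboard 8787 skipped)
--     return [start if i == 0 else start + 1 + i for i, _ in enumerate(protocol)]
-- ===== Notes on version B (the rewrite author's own statement) =====
-- stated objective: simpler
-- what changed: Replaced the stateful loop with a running port counter and in-loop skip of 8787 by a single comprehension mapping each position i directly to its port (8786 for i=0, 8787+i for i>=1).
import Mathlib
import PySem

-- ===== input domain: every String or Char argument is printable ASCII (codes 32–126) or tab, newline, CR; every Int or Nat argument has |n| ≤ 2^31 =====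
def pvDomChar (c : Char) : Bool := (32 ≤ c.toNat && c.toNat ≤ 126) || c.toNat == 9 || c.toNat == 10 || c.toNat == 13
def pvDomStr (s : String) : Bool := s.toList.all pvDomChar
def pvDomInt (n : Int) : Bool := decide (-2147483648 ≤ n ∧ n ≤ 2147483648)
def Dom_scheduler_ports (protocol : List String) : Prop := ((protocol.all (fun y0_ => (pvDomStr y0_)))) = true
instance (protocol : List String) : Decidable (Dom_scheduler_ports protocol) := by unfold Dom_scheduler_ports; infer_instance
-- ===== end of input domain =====

-- B replaces A's stateful loop (running port, in-loop skip of the 8787 dashboard port) by a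
-- comprehension mapping index i directly to its port value; same result, simpler decomposition.

-- ===== PORT A =====
-- loop state: (port, ports); branch order as in A
def scheduler_ports (protocol : List String) : List Int :=
  (protocol.foldl
    (fun (st : Int × List Int) _ =>
      let port := if st.1 = 8787 then st.1 + 1 else st.1
      (port + 1, st.2 ++ [port]))
    ((8786 : Int), ([] : List Int))).2

-- ===== PORT B =====
-- Source B: [start if i == 0 else start + 1 + i for i, _ in enumerate(protocol)]
def scheduler_ports_alt (protocol : List String) : List Int :=
  (PySem.List.enumerate protocol).map
    (fun p => if p.1 = 0 then (8786 : Int) else 8786 + 1 + p.1)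

-- ===== PRECONDITION & SPEC =====
def Spec_scheduler_ports (protocol : List String) (out : List Int) : Prop := out = scheduler_ports_alt protocol
instance (protocol : List String) (out : List Int) : Decidable (Spec_scheduler_ports protocol out) := by unfold Spec_scheduler_ports; infer_instance

-- ===== CLAIM (what is proved, stated in full; the proofs are below) =====
def Claim_equal_scheduler_ports : Prop := ∀ (protocol : List String), Dom_scheduler_ports protocol → Spec_scheduler_ports protocol (scheduler_ports protocol)

-- ===== LEMMAS AND PROOFS =====

-- steady state of A's loop: from port 8787+s with s ≥ 1 the skip branch never fires again,
-- and the remaining appends coincide with B's per-index formula at indices from s on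
theorem pv_fold_steady (l : List String) (s : Int) (acc : List Int) (hs : 1 ≤ s) :
    (l.foldl
      (fun (st : Int × List Int) _ =>
        let port := if st.1 = 8787 then st.1 + 1 else st.1
        (port + 1, st.2 ++ [port])) (8787 + s, acc)).2
    = acc ++ (PySem.List.enumerate l s).map
        (fun p => if p.1 = 0 then (8786 : Int) else 8786 + 1 + p.1) := by
  induction l generalizing s acc with
  | nil => simp [PySem.List.enumerate_nil]
  | cons x xs ih =>
    simp only [List.foldl_cons]
    have hne : ¬ (8787 + s = 8787) := by omega
    have hs0 : ¬ (s = 0) := by omega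
    simp only [hne, if_false]
    have h1 : 8787 + s + 1 = 8787 + (s + 1) := by ring
    rw [h1, ih (s + 1) (acc ++ [8787 + s]) (by omega)]
    rw [PySem.List.enumerate_cons, List.map_cons, List.append_assoc]
    simp only [hs0, if_false, List.singleton_append]
    congr 2

-- ===== VERDICT (by name: the statement is the Claim_ definition above) =====
theorem scheduler_ports_spec : Claim_equal_scheduler_ports := by
  intro protocol _
  show scheduler_ports protocol = scheduler_ports_alt protocol
  match protocol with
  | [] => rfl
  | [x] => rfl
  | x :: y :: rest =>
    unfold scheduler_ports
    simp only [List.foldl_cons]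
    norm_num
    have h2 : (8789 : Int) = 8787 + 2 := by norm_num
    rw [h2, pv_fold_steady rest 2 [8786, 8788] (by norm_num)]
    unfold scheduler_ports_alt
    simp [PySem.List.enumerate_cons]
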